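-- pv_equiv track=rewrite | github.com/pypi-data/pypi-mirror-373 | packages/pads-grading-tools/pads_grading_tools-0.4.7-py3-none-any.whl/grading_tools/grading_table_gen/gen_grading_table.py | merge_length
-- ===== SOURCE A (Python) =====
-- def merge_length(path: tuple[str, ...]) -> int | None:
--     last_value = path[-1]
--     last_index = None
--     for i, n in enumerate(reversed(path[:-1])):
--         if n != last_value:
--             last_index = i
--             break
--     if last_index is None:
--         return len(path)
--     elif last_index > 0:
--         return last_index
--     else:
--         return None
-- ===== SOURCE B (Python) =====
-- def merge_length(path: tuple[str, ...]) -> int | None: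
--     last_value = path[-1]
--     last_diff = -1
--     for i, v in enumerate(path[:-1]):
--         if v != last_value:
--             last_diff = i
--     if last_diff == -1:
--         return len(path)
--     run = len(path) - 2 - last_diff
--     return run if run > 0 else None
-- ===== Notes on version B (the rewrite author's own statement) =====
-- stated objective: alternative
-- what changed: B scans forward with no early break, tracking the last forward mismatch index, and derives the trailing-run boundary arithmetically (len-2-last_diff) instead of A's backward scan over reversed(path[:-1]) that breaks at the first mismatch.
import Mathlib
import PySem

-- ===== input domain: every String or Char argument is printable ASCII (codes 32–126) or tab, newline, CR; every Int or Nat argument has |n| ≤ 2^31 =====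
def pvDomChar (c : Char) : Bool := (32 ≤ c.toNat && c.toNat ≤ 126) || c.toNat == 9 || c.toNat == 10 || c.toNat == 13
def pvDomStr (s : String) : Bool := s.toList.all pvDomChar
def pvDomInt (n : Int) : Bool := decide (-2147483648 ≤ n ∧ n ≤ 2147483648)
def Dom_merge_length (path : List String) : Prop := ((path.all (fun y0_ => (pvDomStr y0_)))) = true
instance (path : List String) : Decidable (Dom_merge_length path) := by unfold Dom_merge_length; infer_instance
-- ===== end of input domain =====

-- B scans forward tracking the last mismatch index instead of A's backward scan with early break; return value equivalence only.

-- ===== PORT A =====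
-- A's loop over enumerate(reversed(path[:-1])) with break: first mismatch index, or none
def pvFindMis (last : String) : List String → Int → Option Int
  | [], _ => none
  | n :: rest, i => if n ≠ last then some i else pvFindMis last rest (i + 1)

def merge_length (path : List String) : Option Int :=
  match PySem.List.pyGet? path (-1) with
  | none => none  -- unreachable under Pre_ (Python raises IndexError)
  | some last_value =>
    match pvFindMis last_value (PySem.List.slice path none (some (-1))).reverse 0 with
    | none => some (path.length : Int)
    | some last_index => if last_index > 0 then some last_index else none

-- ===== PORT B =====
def merge_length_alt (path : List String) : Option Int :=
  match PySem.List.pyGet? path (-1) with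
  | none => none  -- unreachable under Pre_ (Python raises IndexError)
  | some last_value =>
    let last_diff := (PySem.List.enumerate (PySem.List.slice path none (some (-1))) 0).foldl
        (fun acc p => if p.2 ≠ last_value then p.1 else acc) (-1 : Int)
    if last_diff = -1 then some (path.length : Int)
    else
      let run : Int := (path.length : Int) - 2 - last_diff
      if run > 0 then some run else none

-- ===== PRECONDITION & SPEC =====
-- Pre_ excludes only the empty list, on which both Pythons raise IndexError at path[-1].
def Pre_merge_length (path : List String) : Prop := path ≠ []
instance (path : List String) : Decidable (Pre_merge_length path) := by unfold Pre_merge_length; infer_instance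
def pvWitness_merge_length : List String := (["a", "b", "b"])

def Spec_merge_length (path : List String) (out : Option Int) : Prop := out = merge_length_alt path
instance (path : List String) (out : Option Int) : Decidable (Spec_merge_length path out) := by unfold Spec_merge_length; infer_instance

-- ===== CLAIM (what is proved, stated in full; the proofs are below) =====
def Claim_equal_merge_length : Prop := ∀ (path : List String), Dom_merge_length path → Pre_merge_length path → Spec_merge_length path (merge_length path)

-- ===== LEMMAS AND PROOFS =====

-- shifting the start index of A's scan
lemma pvFindMis_shift (last : String) (l : List String) (i : Int) :
    pvFindMis last l i = (pvFindMis last l 0).map (fun k => i + k) := by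
  induction l generalizing i with
  | nil => simp [pvFindMis]
  | cons n rest ih =>
    by_cases h : n = last
    · cases hm : pvFindMis last rest 0 with
      | none => simp [pvFindMis, h, ih (i + 1), ih 1, hm]
      | some k =>
        simp [pvFindMis, h, ih (i + 1), ih 1, hm]
        omega
    · simp [pvFindMis, h]

lemma pvFindMis_bound (last : String) (l : List String) (i j : Int)
    (h : pvFindMis last l i = some j) : i ≤ j ∧ j < i + l.length := by
  induction l generalizing i with
  | nil => simp [pvFindMis] at h
  | cons n rest ih =>
    simp only [pvFindMis] at h
    split at h
    · cases h; constructor <;> simp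
    · have := ih (i + 1) h
      simp only [List.length_cons]
      push_cast at this ⊢
      omega

-- key invariant: B's forward fold computes A's backward first-mismatch, remapped
lemma pvKey (last : String) (xs : List String) :
    (PySem.List.enumerate xs 0).foldl
        (fun acc p => if p.2 ≠ last then p.1 else acc) (-1 : Int) =
      match pvFindMis last xs.reverse 0 with
      | none => (-1 : Int)
      | some i => (xs.length : Int) - 1 - i := by
  induction xs using List.reverseRecOn with
  | nil => simp [pvFindMis]
  | append_singleton ys a ih =>
    rw [PySem.List.enumerate_append, List.foldl_append]
    simp only [List.reverse_append, List.reverse_singleton, List.singleton_append]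
    by_cases h : a = last
    · simp only [PySem.List.enumerate, List.foldl_cons, List.foldl_nil, h, ne_eq,
        not_true_eq_false, if_false, pvFindMis]
      rw [ih, pvFindMis_shift last ys.reverse (0 + 1)]
      cases hm : pvFindMis last ys.reverse 0 with
      | none => simp
      | some i =>
        simp only [Option.map_some, List.length_append, List.length_singleton]
        push_cast
        ring
    · simp only [PySem.List.enumerate, List.foldl_cons, List.foldl_nil, h, ne_eq,
        not_false_eq_true, pvFindMis, if_pos]
      simp

theorem merge_length_spec_aux (path : List String) (hp : path ≠ []) :
    merge_length path = merge_length_alt path := by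
  obtain ⟨last, hlast⟩ : ∃ l, path.getLast? = some l := by
    cases h : path.getLast? with
    | none => exact absurd (List.getLast?_eq_none_iff.mp h) hp
    | some l => exact ⟨l, rfl⟩
  have hget : PySem.List.pyGet? path (-1) = some last := by
    rw [PySem.List.pyGet?_neg_one, hlast]
  have hslice : PySem.List.slice path none (some (-1)) = path.dropLast :=
    PySem.List.slice_to_neg_one path
  have hlen : path.dropLast.length = path.length - 1 := List.length_dropLast
  have hplen : 1 ≤ path.length := List.length_pos_iff.mpr hp
  have hld : (path.dropLast.length : Int) = (path.length : Int) - 1 := by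
    rw [hlen]; omega
  unfold merge_length merge_length_alt
  rw [hget, hslice]
  dsimp only
  rw [pvKey last path.dropLast]
  cases hm : pvFindMis last path.dropLast.reverse 0 with
  | none => simp
  | some i =>
    have hb := pvFindMis_bound last path.dropLast.reverse 0 i hm
    rw [List.length_reverse, hlen] at hb
    have hi0 : 0 ≤ i := hb.1
    have hi1 : i < (path.length : Int) - 1 := by
      have := hb.2
      omega
    rw [hld]
    have hne : (path.length : Int) - 1 - 1 - i ≠ -1 := by omega
    rw [if_neg hne]
    have hrun : (path.length : Int) - 2 - ((path.length : Int) - 1 - 1 - i) = i := by ring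
    rw [hrun]

-- ===== VERDICT (by name: the statement is the Claim_ definition above) =====
theorem merge_length_spec : Claim_equal_merge_length := by
  intro path _ hpre
  exact merge_length_spec_aux path hpre
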